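-- pv_equiv track=rewrite | github.com/natanaelvieirab/worksOfAI | Trabalho 04/question02.py | quantEntity
-- ===== SOURCE A (Python) =====
-- def quantEntity(listTokens):
--     quantGpe = 0
--     quantLocation = 0
--     quantPerson = 0
--
--     for t in listTokens:
--         if(t[1] == 'GPE'):
--             quantGpe += 1
--
--         elif(t[1] == 'LOCATION'):
--             quantLocation += 1
--
--         elif(t[1] == 'PERSON'):
--             quantPerson += 1
--
--     return {'gpe': quantGpe, 'location': quantLocation, 'person': quantPerson}
-- ===== SOURCE B (Python) =====
-- def quantEntity(listTokens):
--     # Three staged passes: for each target label, count matching tokens directly.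
--     return {name: sum(1 for t in listTokens if t[1] == label)
--             for name, label in (('gpe', 'GPE'), ('location', 'LOCATION'), ('person', 'PERSON'))}
-- ===== Notes on version B (the rewrite author's own statement) =====
-- stated objective: alternative
-- what changed: Replaces the single-pass if/elif three-accumulator loop with three independent filter-and-count passes, one per target label, assembled by a dict comprehension over (name, label) pairs.
import Mathlib
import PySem

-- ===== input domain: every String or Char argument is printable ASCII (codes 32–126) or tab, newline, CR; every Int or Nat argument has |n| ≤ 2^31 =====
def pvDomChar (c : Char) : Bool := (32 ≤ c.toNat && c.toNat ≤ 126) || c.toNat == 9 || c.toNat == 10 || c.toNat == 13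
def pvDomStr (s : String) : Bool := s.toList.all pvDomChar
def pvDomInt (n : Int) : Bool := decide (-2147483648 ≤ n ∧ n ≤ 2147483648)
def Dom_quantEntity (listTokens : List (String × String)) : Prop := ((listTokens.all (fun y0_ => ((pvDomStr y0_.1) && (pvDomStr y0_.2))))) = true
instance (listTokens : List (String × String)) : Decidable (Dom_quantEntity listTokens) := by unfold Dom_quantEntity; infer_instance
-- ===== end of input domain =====

-- B replaces the single-pass if/elif accumulator loop with three independent filter-and-count passes, one per label (alternative decomposition).


-- ===== PORT A =====
def quantEntity (listTokens : List (String × String)) : List (String × Int) :=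
  let cs := listTokens.foldl (fun (acc : Int × Int × Int) t =>
    if t.2 == "GPE" then (acc.1 + 1, acc.2.1, acc.2.2)
    else if t.2 == "LOCATION" then (acc.1, acc.2.1 + 1, acc.2.2)
    else if t.2 == "PERSON" then (acc.1, acc.2.1, acc.2.2 + 1)
    else acc) (0, 0, 0)
  [("gpe", cs.1), ("location", cs.2.1), ("person", cs.2.2)]

-- ===== PORT B =====
-- sum(1 for t in listTokens if t[1] == label): one filtered counting pass per label
def pvCountLabel (listTokens : List (String × String)) (label : String) : Int :=
  listTokens.foldl (fun (s : Int) t => if t.2 == label then s + 1 else s) 0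

def quantEntity_alt (listTokens : List (String × String)) : List (String × Int) :=
  [("gpe", "GPE"), ("location", "LOCATION"), ("person", "PERSON")].map
    (fun nl => (nl.1, pvCountLabel listTokens nl.2))

-- ===== PRECONDITION & SPEC =====
def Spec_quantEntity (listTokens : List (String × String)) (out : List (String × Int)) : Prop := out = quantEntity_alt listTokens
instance (listTokens : List (String × String)) (out : List (String × Int)) : Decidable (Spec_quantEntity listTokens out) := by unfold Spec_quantEntity; infer_instance

-- ===== CLAIM (what is proved, stated in full; the proofs are below) =====
def Claim_equal_quantEntity : Prop := ∀ (listTokens : List (String × String)), Dom_quantEntity listTokens → Spec_quantEntity listTokens (quantEntity listTokens)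

-- ===== LEMMAS AND PROOFS =====
-- shifting the accumulator of the counting fold
lemma countLabel_shift (lab : String) (ys : List (String × String)) (a b : Int) :
    ys.foldl (fun (s : Int) t => if t.2 == lab then s + 1 else s) (a + b)
      = ys.foldl (fun (s : Int) t => if t.2 == lab then s + 1 else s) a + b := by
  induction ys generalizing a with
  | nil => simp
  | cons y ys ihy =>
    simp only [List.foldl_cons]
    split_ifs
    · rw [show a + b + 1 = (a + 1) + b by ring, ihy]
    · rw [ihy]

lemma countLabel_cons (x : String × String) (xs : List (String × String)) (lab : String) :
    pvCountLabel (x :: xs) lab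
      = (if x.2 == lab then (1 : Int) else 0) + pvCountLabel xs lab := by
  simp only [pvCountLabel, List.foldl_cons]
  split_ifs with h
  · rw [show (0 : Int) + 1 = 0 + 1 by rfl, countLabel_shift]; ring
  · simp

-- loop invariant: A's three accumulators are g/l/p plus the per-label counts of the tokens
lemma foldl_counts (xs : List (String × String)) (g l p : Int) :
    xs.foldl (fun (acc : Int × Int × Int) t =>
      if t.2 == "GPE" then (acc.1 + 1, acc.2.1, acc.2.2)
      else if t.2 == "LOCATION" then (acc.1, acc.2.1 + 1, acc.2.2)
      else if t.2 == "PERSON" then (acc.1, acc.2.1, acc.2.2 + 1)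
      else acc) (g, l, p)
    = (g + pvCountLabel xs "GPE", l + pvCountLabel xs "LOCATION", p + pvCountLabel xs "PERSON") := by
  induction xs generalizing g l p with
  | nil => simp [pvCountLabel]
  | cons x xs ih =>
    simp only [List.foldl_cons, countLabel_cons]
    split_ifs with h1 h2 h3 <;> rw [ih] <;> simp_all <;> ring_nf

theorem quantEntity_spec : Claim_equal_quantEntity := by
  intro xs _
  unfold Spec_quantEntity quantEntity quantEntity_alt
  simp only [List.map_cons, List.map_nil, foldl_counts, zero_add]

-- ===== VERDICT (by name: the statement is the Claim_ definition above) =====
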